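-- pv_equiv track=rewrite | github.com/Bittu96/Other_codes | check_primes.py | check
-- ===== SOURCE A (Python) =====
-- from math import sqrt
--
-- def is_prime(num):
--     for i in range(2,1+int(sqrt(num))):
--         if num%i:
--             continue
--         else:
--             return False
--     return num
--
-- def check(l,r):
--     lprime,rprime = None,None
--     while l<=r:
--         if lprime==None:
--             if is_prime(l):
--                 lprime=l
--             else:
--                 l+=1
--         elif rprime==None:
--             if is_prime(r):
--                 rprime=r
--             else:
--                 r-=1
--         else: return lprime,rprime
-- ===== SOURCE B (Python) =====
-- from math import isqrt
--
-- _W = 4096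
--
--
-- def _sieve_window(lo, hi):
--     # flags[n - lo] is truthy iff n passes is_prime's test: composites are crossed
--     # off as multiples of each trial divisor d (starting at max(d*d, first multiple >= lo));
--     # 0 is cleared explicitly, 1 is never crossed off (it passes the test).
--     flags = [1] * (hi - lo + 1)
--     if lo <= 0 <= hi:
--         flags[-lo] = 0
--     for d in range(2, isqrt(hi) + 1):
--         start = max(d * d, ((lo + d - 1) // d) * d)
--         for m in range(start, hi + 1, d):
--             flags[m - lo] = 0
--     return flags
--
--
-- def _scan_up(l, r):
--     # smallest flagged n in [l, r], sieving one window at a time upward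
--     lo = l
--     while lo <= r:
--         hi = min(lo + _W - 1, r)
--         flags = _sieve_window(lo, hi)
--         for i in range(0, hi - lo + 1):
--             if flags[i]:
--                 return lo + i
--         lo = hi + 1
--     return None
--
--
-- def _scan_down(l, r):
--     # largest flagged n in [l, r], sieving one window at a time downward
--     hi = r
--     while l <= hi:
--         lo = max(hi - _W + 1, l)
--         flags = _sieve_window(lo, hi)
--         for i in range(hi - lo, -1, -1):
--             if flags[i]:
--                 return lo + i
--         hi = lo - 1
--     return None
--
--
-- def check(l, r):
--     lprime = _scan_up(l, r)
--     if lprime is None: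
--         return None
--     rprime = _scan_down(lprime, r)
--     if rprime is None:
--         return None
--     return lprime, rprime
-- ===== Notes on version B (the rewrite author's own statement) =====
-- stated objective: alternative
-- what changed: Replaced A's per-candidate trial-division state machine with a segmented sieve: B sieves fixed-size windows (crossing off each trial divisor's multiples starting at max(d*d, first multiple >= lo)) and scans the window's flag array upward from l and downward from r, so no candidate is ever trial-divided individually.
import Mathlib
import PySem

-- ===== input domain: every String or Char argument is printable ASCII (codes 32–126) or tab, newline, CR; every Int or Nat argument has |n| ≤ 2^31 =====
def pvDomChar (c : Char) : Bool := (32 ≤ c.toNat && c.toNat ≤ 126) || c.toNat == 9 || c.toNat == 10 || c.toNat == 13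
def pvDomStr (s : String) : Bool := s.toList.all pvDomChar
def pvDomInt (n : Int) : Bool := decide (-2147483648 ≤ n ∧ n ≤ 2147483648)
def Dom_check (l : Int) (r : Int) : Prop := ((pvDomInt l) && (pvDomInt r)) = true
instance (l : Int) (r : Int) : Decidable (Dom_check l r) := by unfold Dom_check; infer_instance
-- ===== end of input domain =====

-- B replaces A's candidate-by-candidate trial-division state machine by a segmented
-- sieve: it crosses off multiples of every trial divisor inside fixed-size windows and
-- scans the resulting flag arrays (upward from l, then downward from r).

-- tiny named termination lemmas: the ports cite these by name in decreasing_by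
theorem pvDecSetLp (n : Nat) (a : Int) (rp : Option Int) :
    ((n + if (some a).isNone = true then 1 else 0) + if rp.isNone = true then 1 else 0) <
      ((n + if (none : Option Int).isNone = true then 1 else 0) + if rp.isNone = true then 1 else 0) := by
  simp
theorem pvDecIncr (l r : Int) (rp : Option Int) (h : l ≤ r) :
    ((2 * (r - (l + 1) + 1).toNat + if (none : Option Int).isNone = true then 1 else 0) +
        if rp.isNone = true then 1 else 0) <
      ((2 * (r - l + 1).toNat + if (none : Option Int).isNone = true then 1 else 0) +
        if rp.isNone = true then 1 else 0) := by
  have h1 : (r - (l + 1) + 1).toNat < (r - l + 1).toNat := by omega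
  omega
theorem pvDecSetRp (n : Nat) (a b : Int) :
    ((n + if (some a).isNone = true then 1 else 0) + if (some b).isNone = true then 1 else 0) <
      ((n + if (some a).isNone = true then 1 else 0) + if (none : Option Int).isNone = true then 1 else 0) := by
  simp
theorem pvDecDecr (l r a : Int) (h : l ≤ r) :
    ((2 * (r - 1 - l + 1).toNat + if (some a).isNone = true then 1 else 0) +
        if (none : Option Int).isNone = true then 1 else 0) <
      ((2 * (r - l + 1).toNat + if (some a).isNone = true then 1 else 0) +
        if (none : Option Int).isNone = true then 1 else 0) := by
  have h1 : (r - 1 - l + 1).toNat < (r - l + 1).toNat := by omega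
  omega
theorem pvDecDown (i : Int) (h : 0 ≤ i) : (i - 1 + 1).toNat < (i + 1).toNat := by omega
theorem pvDecWinUp (lo r : Int) (h : lo ≤ r) :
    (r + 1 - (min (lo + 4096 - 1) r + 1)).toNat < (r + 1 - lo).toNat := by omega
theorem pvDecWinDn (l hi : Int) (h : l ≤ hi) :
    (max (hi - 4096 + 1) l - 1 + 1 - l).toNat < (hi + 1 - l).toNat := by omega

-- ===== PORT A =====
-- is_prime(num): Python returns num (truthy for num ≠ 0) or False; check uses it only in
-- boolean context, so the port returns that truthiness. For 0 ≤ num ≤ 2^31,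
-- int(sqrt(num)) = Int.sqrt num exactly (double sqrt is correctly rounded below 2^52);
-- for num < 0 Python raises ValueError — those inputs are outside Pre_check.
def isPrime (num : Int) : Bool :=
  if (PySem.List.pyRange 2 (1 + Int.sqrt num) 1).all (fun i => decide (num % i ≠ 0)) then
    decide (num ≠ 0)
  else
    false

-- A's loop: state (l, r, lprime, rprime), exactly the branch order of the Python while.
def checkLoop (l r : Int) (lp rp : Option Int) : Option (Int × Int) :=
  if l ≤ r then
    match lp with
    | none =>
        if isPrime l then checkLoop l r (some l) rp
        else checkLoop (l + 1) r none rp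
    | some lpv =>
        match rp with
        | none =>
            if isPrime r then checkLoop l r (some lpv) (some r)
            else checkLoop l (r - 1) (some lpv) none
        | some rpv => some (lpv, rpv)
  else none
  termination_by 2 * (r - l + 1).toNat + (if lp.isNone then 1 else 0) + (if rp.isNone then 1 else 0)
  decreasing_by
  · exact pvDecSetLp _ _ _
  · exact pvDecIncr l r rp ‹l ≤ r›
  · exact pvDecSetRp _ _ _
  · exact pvDecDecr l r lpv ‹l ≤ r›

def check (l : Int) (r : Int) : Option (Int × Int) :=
  checkLoop l r none none

-- ===== PORT B =====
-- _sieve_window(lo, hi) of Source B; the int flags 1/0 (used only in boolean context) are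
-- ported as Bool. Python's isqrt(hi) = Int.sqrt hi for 0 ≤ hi (the only calls made
-- inside Pre_check); `//` is PySem.Int.floordiv.
def sieveWindow (lo hi : Int) : List Bool :=
  let flags := List.replicate (hi - lo + 1).toNat true
  let flags := if lo ≤ 0 ∧ 0 ≤ hi then flags.set (-lo).toNat false else flags
  (PySem.List.pyRange 2 (Int.sqrt hi + 1) 1).foldl (fun fl d =>
    (PySem.List.pyRange (max (d * d) (PySem.Int.floordiv (lo + d - 1) d * d)) (hi + 1) d).foldl
      (fun fl2 m => fl2.set (m - lo).toNat false) fl) flags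

-- inner `for i in range(0, hi-lo+1): if flags[i]: return lo+i` of _scan_up:
-- the loop walks the flag list front to back, so it is ported as that walk.
def firstTrueIdx : List Bool → Option Nat
  | [] => none
  | b :: rest => if b then some 0 else (firstTrueIdx rest).map (· + 1)

-- inner `for i in range(hi-lo, -1, -1): if flags[i]: return lo+i` of _scan_down
-- (getD's default is never used: the loop only probes indices 0..hi-lo).
def lastTrueFrom (fl : List Bool) (i : Int) : Option Int :=
  if 0 ≤ i then
    if fl.getD i.toNat false then some i else lastTrueFrom fl (i - 1)
  else none
  termination_by (i + 1).toNat
  decreasing_by exact pvDecDown i ‹0 ≤ i›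

-- _scan_up(l, r) of Source B: window-by-window upward
def scanUp (lo r : Int) : Option Int :=
  if lo ≤ r then
    let hi := min (lo + 4096 - 1) r
    match firstTrueIdx (sieveWindow lo hi) with
    | some i => some (lo + (i : Int))
    | none => scanUp (hi + 1) r
  else none
  termination_by (r + 1 - lo).toNat
  decreasing_by exact pvDecWinUp lo r ‹lo ≤ r›

-- _scan_down(l, r) of Source B: window-by-window downward
def scanDown (l hi : Int) : Option Int :=
  if l ≤ hi then
    let lo := max (hi - 4096 + 1) l
    match lastTrueFrom (sieveWindow lo hi) (hi - lo) with
    | some i => some (lo + i)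
    | none => scanDown l (lo - 1)
  else none
  termination_by (hi + 1 - l).toNat
  decreasing_by exact pvDecWinDn l hi ‹l ≤ hi›

def check_alt (l : Int) (r : Int) : Option (Int × Int) :=
  match scanUp l r with
  | none => none
  | some lp =>
      match scanDown lp r with
      | none => none
      | some rp => some (lp, rp)

-- ===== PRECONDITION & SPEC =====
-- Pre_ excludes exactly the inputs where Python A raises (math domain error):
-- it calls is_prime on a negative number iff l < 0 and the loop is entered (l ≤ r).
def Pre_check (l : Int) (r : Int) : Prop := r < l ∨ 0 ≤ l
instance (l : Int) (r : Int) : Decidable (Pre_check l r) := by unfold Pre_check; infer_instance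
def pvWitness_check : Int × Int := (10, 30)

def Spec_check (l : Int) (r : Int) (out : Option (Int × Int)) : Prop := out = check_alt l r
instance (l : Int) (r : Int) (out : Option (Int × Int)) : Decidable (Spec_check l r out) := by unfold Spec_check; infer_instance

-- ===== CLAIM (what is proved, stated in full; the proofs are below) =====
def Claim_equal_check : Prop := ∀ (l : Int) (r : Int), Dom_check l r → Pre_check l r → Spec_check l r (check l r)

-- ===== LEMMAS AND PROOFS =====

-- ---- A's loop split into the two scans it performs ----

def findUp (a b : Int) : Option Int :=
  if a ≤ b then (if isPrime a then some a else findUp (a + 1) b) else none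
  termination_by (b + 1 - a).toNat
  decreasing_by omega

def findDown (a b : Int) : Option Int :=
  if a ≤ b then (if isPrime b then some b else findDown a (b - 1)) else none
  termination_by (b + 1 - a).toNat
  decreasing_by omega

theorem checkLoop_phase1 (l r : Int) :
    checkLoop l r none none =
      match findUp l r with
      | none => none
      | some lp => checkLoop lp r (some lp) none := by
  by_cases h : l ≤ r
  · rw [checkLoop, findUp]
    by_cases hp : isPrime l
    · simp [h, hp]
    · simp only [h, if_true, hp, if_false, Bool.false_eq_true]
      exact checkLoop_phase1 (l + 1) r
  · rw [checkLoop, findUp]; simp [h]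
  termination_by (r + 1 - l).toNat
  decreasing_by omega

theorem checkLoop_phase2 (lp r : Int) :
    checkLoop lp r (some lp) none =
      match findDown lp r with
      | some rp => some (lp, rp)
      | none => none := by
  by_cases h : lp ≤ r
  · rw [checkLoop, findDown]
    by_cases hp : isPrime r
    · simp only [h, if_true, hp, if_true]
      rw [checkLoop]
      simp [h]
    · simp only [h, if_true, hp, if_false, Bool.false_eq_true]
      exact checkLoop_phase2 lp (r - 1)
  · rw [checkLoop, findDown]; simp [h]
  termination_by (r + 1 - lp).toNat
  decreasing_by omega

-- ---- arithmetic helpers ----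

theorem le_sqrt_iff (d n : Int) (hd : 0 ≤ d) (hn : 0 ≤ n) :
    d ≤ Int.sqrt n ↔ d * d ≤ n := by
  unfold Int.sqrt
  rw [show d = ((d.toNat : Nat) : Int) by omega, Int.ofNat_le, Nat.le_sqrt,
    ← Nat.cast_le (α := Int)]
  push_cast
  omega

-- least multiple of d that is ≥ lo, as Source B computes it
theorem ceil_mult_ge (lo d : Int) (hd : 0 < d) :
    lo ≤ PySem.Int.floordiv (lo + d - 1) d * d := by
  rw [PySem.Int.floordiv_eq_ediv_of_pos hd]
  have h1 := Int.ediv_add_emod (lo + d - 1) d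
  have h2 := Int.emod_nonneg (lo + d - 1) (by omega : d ≠ 0)
  have h3 := Int.emod_lt_of_pos (lo + d - 1) hd
  nlinarith [h1, h2, h3]

theorem ceil_mult_le (lo d n : Int) (hd : 0 < d) (hdvd : d ∣ n) (hlo : lo ≤ n) :
    PySem.Int.floordiv (lo + d - 1) d * d ≤ n := by
  obtain ⟨k, rfl⟩ := hdvd
  rw [PySem.Int.floordiv_eq_ediv_of_pos hd]
  have hq : (lo + d - 1) / d ≤ k := by
    have h1 := Int.ediv_add_emod (lo + d - 1) d
    have h2 := Int.emod_nonneg (lo + d - 1) (by omega : d ≠ 0)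
    have hlt : d * ((lo + d - 1) / d) < d * (k + 1) := by nlinarith [h1, h2]
    have := lt_of_mul_lt_mul_left hlt (le_of_lt hd)
    omega
  calc (lo + d - 1) / d * d ≤ k * d := by
        exact mul_le_mul_of_nonneg_right hq (le_of_lt hd)
    _ = d * k := mul_comm k d

theorem dvd_ceil_mult (lo d : Int) : d ∣ PySem.Int.floordiv (lo + d - 1) d * d :=
  dvd_mul_left d _

-- ---- generic facts about the marking folds ----

theorem length_foldl_set (xs : List Int) (g : Int → Nat) (fl : List Bool) :
    (xs.foldl (fun fl2 x => fl2.set (g x) false) fl).length = fl.length := by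
  induction xs generalizing fl with
  | nil => rfl
  | cons x xs ih => simp [List.foldl_cons, ih, List.length_set]

theorem getD_foldl_set (xs : List Int) (g : Int → Nat) (fl : List Bool) (i : Nat) :
    (xs.foldl (fun fl2 x => fl2.set (g x) false) fl).getD i false
      = ((fl.getD i false) && !(xs.any (fun x => g x == i))) := by
  induction xs generalizing fl with
  | nil => simp
  | cons x xs ih =>
      rw [List.foldl_cons, ih]
      by_cases hx : g x = i
      · subst hx
        have hset : (fl.set (g x) false).getD (g x) false = false := by
          rcases Nat.lt_or_ge (g x) fl.length with hlt | hge
          · simp [List.getD, List.getElem?_set_self, hlt]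
          · simp [List.getD,
              List.getElem?_eq_none (l := fl.set (g x) false) (by simpa using hge)]
        rw [hset]
        simp
      · have hset : (fl.set (g x) false).getD i false = fl.getD i false := by
          simp [List.getD, List.getElem?_set, hx]
        rw [hset, List.any_cons]
        have hbx : (g x == i) = false := by simp [hx]
        simp [hbx]

theorem getD_foldl_foldl_set (ds : List Int) (inner : Int → List Int)
    (g : Int → Int → Nat) (fl : List Bool) (i : Nat) :
    (ds.foldl (fun fl2 d => (inner d).foldl (fun fl3 m => fl3.set (g d m) false) fl2) fl).getD i false
      = ((fl.getD i false) &&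
         !(ds.any (fun d => (inner d).any (fun m => g d m == i)))) := by
  induction ds generalizing fl with
  | nil => simp
  | cons d ds ih =>
      rw [List.foldl_cons, ih, getD_foldl_set]
      simp [Bool.and_assoc]

theorem length_foldl_foldl_set (ds : List Int) (inner : Int → List Int)
    (g : Int → Int → Nat) (fl : List Bool) :
    (ds.foldl (fun fl2 d => (inner d).foldl (fun fl3 m => fl3.set (g d m) false) fl2) fl).length
      = fl.length := by
  induction ds generalizing fl with
  | nil => rfl
  | cons d ds ih => simp [List.foldl_cons, ih, length_foldl_set]

-- ---- the sieve computes exactly is_prime's verdict ----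

theorem isPrime_iff (n : Int) (hn : 0 ≤ n) :
    isPrime n = true ↔ n ≠ 0 ∧ ¬ ∃ d : Int, 2 ≤ d ∧ d ∣ n ∧ d * d ≤ n := by
  unfold isPrime
  split
  · rename_i hall
    rw [List.all_eq_true] at hall
    simp only [decide_eq_true_eq]
    constructor
    · intro hne
      refine ⟨hne, ?_⟩
      rintro ⟨d, hd2, hdvd, hdd⟩
      have hds : d ≤ Int.sqrt n := (le_sqrt_iff d n (by omega) hn).mpr hdd
      have hmem : d ∈ PySem.List.pyRange 2 (1 + Int.sqrt n) 1 := by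
        rw [PySem.List.mem_pyRange_one]; omega
      have := hall d hmem
      simp only [decide_eq_true_eq] at this
      exact this (Int.emod_eq_zero_of_dvd hdvd)
    · exact fun h => h.1
  · rename_i hall
    rw [List.all_eq_true] at hall
    push_neg at hall
    obtain ⟨d, hmem, hmod⟩ := hall
    rw [PySem.List.mem_pyRange_one] at hmem
    have hmod' : n % d = 0 := by simpa using hmod
    constructor
    · intro h; exact absurd h (by decide)
    · rintro ⟨hne, hno⟩
      exact absurd ⟨d, by omega, Int.dvd_of_emod_eq_zero hmod',
        (le_sqrt_iff d n (by omega) hn).mp (by omega)⟩ hno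

theorem sieve_any_iff (lo hi : Int) (i : Nat) (h0 : 0 ≤ lo) (hih : lo + (i : Int) ≤ hi) :
    ((PySem.List.pyRange 2 (Int.sqrt hi + 1) 1).any (fun d =>
        (PySem.List.pyRange (max (d * d) (PySem.Int.floordiv (lo + d - 1) d * d)) (hi + 1) d).any
          (fun m => ((m - lo).toNat == i)))) = true
      ↔ ∃ d : Int, 2 ≤ d ∧ d ∣ (lo + (i : Int)) ∧ d * d ≤ lo + (i : Int) := by
  set n : Int := lo + (i : Int) with hn
  rw [List.any_eq_true]
  constructor
  · rintro ⟨d, hdmem, hany⟩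
    rw [PySem.List.mem_pyRange_one] at hdmem
    rw [List.any_eq_true] at hany
    obtain ⟨m, hmmem, hmi⟩ := hany
    have hdpos : (0 : Int) < d := by omega
    rw [PySem.List.mem_pyRange_iff_of_pos hdpos] at hmmem
    obtain ⟨hms, hmh, hmdvd⟩ := hmmem
    have hstart_dvd : d ∣ max (d * d) (PySem.Int.floordiv (lo + d - 1) d * d) := by
      rcases max_choice (d * d) (PySem.Int.floordiv (lo + d - 1) d * d) with h | h <;> rw [h]
      · exact dvd_mul_right d d
      · exact dvd_ceil_mult lo d
    have hmlo : lo ≤ m := le_trans (le_trans (ceil_mult_ge lo d hdpos) (le_max_right _ _)) hms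
    have hmdd : d * d ≤ m := le_trans (le_max_left _ _) hms
    have hmn : m = n := by
      simp only [beq_iff_eq] at hmi
      omega
    have hdm : d ∣ m := by
      have h := dvd_add hmdvd hstart_dvd
      simpa using h
    exact ⟨d, by omega, by rw [← hmn]; exact hdm, by omega⟩
  · rintro ⟨d, hd2, hdvd, hdd⟩
    have hdpos : (0 : Int) < d := by omega
    have hnhi : n ≤ hi := hih
    have hn0 : 0 ≤ n := by omega
    refine ⟨d, ?_, ?_⟩
    · rw [PySem.List.mem_pyRange_one]
      have : d ≤ Int.sqrt hi := (le_sqrt_iff d hi (by omega) (by omega)).mpr (by omega)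
      omega
    · rw [List.any_eq_true]
      refine ⟨n, ?_, by simp; omega⟩
      rw [PySem.List.mem_pyRange_iff_of_pos hdpos]
      have hstart_dvd : d ∣ max (d * d) (PySem.Int.floordiv (lo + d - 1) d * d) := by
        rcases max_choice (d * d) (PySem.Int.floordiv (lo + d - 1) d * d) with h | h <;> rw [h]
        · exact dvd_mul_right d d
        · exact dvd_ceil_mult lo d
      refine ⟨max_le hdd (ceil_mult_le lo d n hdpos hdvd (by omega)), by omega, ?_⟩
      exact dvd_sub hdvd hstart_dvd

theorem length_sieveWindow (lo hi : Int) :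
    (sieveWindow lo hi).length = (hi - lo + 1).toNat := by
  unfold sieveWindow
  split <;> simp [length_foldl_foldl_set, List.length_set]

theorem sieveWindow_flag (lo hi : Int) (i : Nat) (h0 : 0 ≤ lo) (hih : lo + (i : Int) ≤ hi) :
    (sieveWindow lo hi).getD i false = isPrime (lo + (i : Int)) := by
  have hn0 : 0 ≤ lo + (i : Int) := by omega
  have hiL : i < (hi - lo + 1).toNat := by omega
  unfold sieveWindow
  rw [getD_foldl_foldl_set _ _ (fun d m => (m - lo).toNat)]
  have hinit : ((if lo ≤ 0 ∧ 0 ≤ hi then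
        (List.replicate (hi - lo + 1).toNat true).set (-lo).toNat false
      else List.replicate (hi - lo + 1).toNat true) : List Bool).getD i false
      = !decide (lo = 0 ∧ i = 0) := by
    split
    · rename_i hg
      have hlo0 : lo = 0 := le_antisymm hg.1 h0
      subst hlo0
      by_cases hi0 : i = 0
      · subst hi0
        simp only [List.getD, List.getElem?_set, List.getElem?_replicate]
        split_ifs <;> simp_all <;> omega
      · simp only [List.getD, List.getElem?_set, List.getElem?_replicate]
        split_ifs <;> simp_all <;> omega
    · rename_i hg
      have hne : ¬(lo = 0 ∧ i = 0) := by
        rintro ⟨h1, _⟩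
        exact hg ⟨by omega, by omega⟩
      simp [List.getD, List.getElem?_replicate, hiL, hne]
  rw [hinit]
  cases hB : isPrime (lo + (i : Int)) with
  | true =>
      obtain ⟨hne, hno⟩ := (isPrime_iff _ hn0).mp hB
      have h1 : decide (lo = 0 ∧ i = 0) = false := by
        simp only [decide_eq_false_iff_not]
        rintro ⟨ha, hb⟩
        apply hne
        omega
      have h2 : ((PySem.List.pyRange 2 (Int.sqrt hi + 1) 1).any (fun d =>
          (PySem.List.pyRange (max (d * d) (PySem.Int.floordiv (lo + d - 1) d * d)) (hi + 1) d).any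
            (fun m => ((m - lo).toNat == i)))) = false := by
        rw [Bool.eq_false_iff, Ne, sieve_any_iff lo hi i h0 hih]
        exact hno
      rw [h1, h2]
      rfl
  | false =>
      have hnc : ¬((lo + (i : Int)) ≠ 0 ∧
          ¬ ∃ d : Int, 2 ≤ d ∧ d ∣ (lo + (i : Int)) ∧ d * d ≤ lo + (i : Int)) := by
        intro hh
        rw [(isPrime_iff _ hn0).mpr hh] at hB
        cases hB
      by_cases hz : lo + (i : Int) = 0
      · have h1 : decide (lo = 0 ∧ i = 0) = true := by
          simp only [decide_eq_true_eq]
          omega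
        rw [h1]
        rfl
      · have hC : ∃ d : Int, 2 ≤ d ∧ d ∣ (lo + (i : Int)) ∧ d * d ≤ lo + (i : Int) := by
          by_contra hno
          exact hnc ⟨hz, hno⟩
        have h2 := (sieve_any_iff lo hi i h0 hih).mpr hC
        rw [h2]
        simp

-- ---- window scans agree with the straight scans ----

theorem firstTrueIdx_eq_findUp (fl : List Bool) (lo hi : Int)
    (hlen : fl.length = (hi - lo + 1).toNat)
    (hpt : ∀ i : Nat, i < fl.length → fl.getD i false = isPrime (lo + (i : Int))) :
    (firstTrueIdx fl).map (fun (i : Nat) => lo + (i : Int)) = findUp lo hi := by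
  induction fl generalizing lo with
  | nil =>
      rw [findUp, if_neg (by simp at hlen; omega)]
      rfl
  | cons b rest ih =>
      have hlohi : lo ≤ hi := by simp at hlen; omega
      have hb : b = isPrime lo := by simpa using hpt 0 (by simp)
      rw [findUp, if_pos hlohi, hb]
      cases hbp : isPrime lo with
      | true => simp [firstTrueIdx, hbp]
      | false =>
          simp only [firstTrueIdx, Bool.false_eq_true, if_false]
          have hrec := ih (lo + 1) (by simp at hlen ⊢; omega) (fun i hi2 => by
            have h := hpt (i + 1) (by simp; omega)
            rw [List.getD_cons_succ] at h
            rw [h]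
            congr 1
            push_cast
            ring)
          rw [← hrec]
          cases firstTrueIdx rest with
          | none => rfl
          | some k =>
              simp only [Option.map_some]
              congr 1
              push_cast
              ring

theorem lastTrueFrom_eq_findDown (fl : List Bool) (lo : Int) (j : Int) (h0 : 0 ≤ lo)
    (hpt : ∀ i : Nat, (i : Int) ≤ j → fl.getD i false = isPrime (lo + (i : Int))) :
    (lastTrueFrom fl j).map (fun x => lo + x) = findDown lo (lo + j) := by
  by_cases hj : 0 ≤ j
  · rw [lastTrueFrom, if_pos hj, findDown, if_pos (by omega : lo ≤ lo + j)]
    have hflag : fl.getD j.toNat false = isPrime (lo + j) := by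
      rw [hpt j.toNat (by omega)]
      congr 1
      omega
    rw [hflag]
    split_ifs with hp
    · simp
    · have hrec := lastTrueFrom_eq_findDown fl lo (j - 1) h0 (fun i hi2 => hpt i (by omega))
      rw [hrec]
      congr 1
      ring
  · rw [lastTrueFrom, if_neg hj, findDown, if_neg (by omega)]
    rfl
  termination_by (j + 1).toNat
  decreasing_by omega

theorem findUp_split (lo hi r : Int) (h1 : lo ≤ hi + 1) (h2 : hi ≤ r) :
    findUp lo r = match findUp lo hi with
                  | some x => some x
                  | none => findUp (hi + 1) r := by
  by_cases h : lo ≤ hi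
  · have hstep : findUp lo hi = if isPrime lo then some lo else findUp (lo + 1) hi := by
      rw [findUp, if_pos h]
    rw [hstep, findUp, if_pos (by omega : lo ≤ r)]
    cases hp : isPrime lo with
    | true => simp
    | false =>
        simp only [Bool.false_eq_true, if_false]
        exact findUp_split (lo + 1) hi r (by omega) h2
  · have hnone : findUp lo hi = none := by rw [findUp, if_neg h]
    rw [hnone]
    have : lo = hi + 1 := by omega
    rw [this]
  termination_by (hi + 1 - lo).toNat
  decreasing_by omega

theorem findDown_split (l lo r : Int) (h1 : l ≤ lo) (h2 : lo ≤ r + 1) :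
    findDown l r = match findDown lo r with
                   | some x => some x
                   | none => findDown l (lo - 1) := by
  by_cases h : lo ≤ r
  · have hstep : findDown lo r = if isPrime r then some r else findDown lo (r - 1) := by
      rw [findDown, if_pos h]
    rw [hstep, findDown, if_pos (by omega : l ≤ r)]
    cases hp : isPrime r with
    | true => simp
    | false =>
        simp only [Bool.false_eq_true, if_false]
        exact findDown_split l lo (r - 1) h1 (by omega)
  · have hnone : findDown lo r = none := by rw [findDown, if_neg h]
    rw [hnone]
    have : lo - 1 = r := by omega
    rw [this]
  termination_by (r + 1 - l).toNat
  decreasing_by omega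

theorem scanUp_eq_findUp (lo r : Int) (h0 : 0 ≤ lo) : scanUp lo r = findUp lo r := by
  rw [scanUp]
  by_cases h : lo ≤ r
  · rw [if_pos h]
    dsimp only
    have hfw := firstTrueIdx_eq_findUp (sieveWindow lo (min (lo + 4096 - 1) r)) lo
        (min (lo + 4096 - 1) r) (length_sieveWindow _ _)
        (fun i hi2 => sieveWindow_flag lo _ i h0
          (by rw [length_sieveWindow] at hi2; omega))
    rw [findUp_split lo (min (lo + 4096 - 1) r) r (by omega) (by omega)]
    cases hft : firstTrueIdx (sieveWindow lo (min (lo + 4096 - 1) r)) with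
    | some i =>
        have h1 : findUp lo (min (lo + 4096 - 1) r) = some (lo + (i : Int)) := by
          rw [hft] at hfw
          simpa using hfw.symm
        rw [h1]
    | none =>
        have h1 : findUp lo (min (lo + 4096 - 1) r) = none := by
          rw [hft] at hfw
          simpa using hfw.symm
        rw [h1]
        exact scanUp_eq_findUp (min (lo + 4096 - 1) r + 1) r (by omega)
  · rw [if_neg h, findUp, if_neg h]
  termination_by (r + 1 - lo).toNat
  decreasing_by omega

theorem scanDown_eq_findDown (l hi : Int) (h0 : 0 ≤ l) : scanDown l hi = findDown l hi := by
  rw [scanDown]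
  by_cases h : l ≤ hi
  · rw [if_pos h]
    dsimp only
    have hlo0 : 0 ≤ max (hi - 4096 + 1) l := by omega
    have hfw := lastTrueFrom_eq_findDown (sieveWindow (max (hi - 4096 + 1) l) hi)
        (max (hi - 4096 + 1) l) (hi - max (hi - 4096 + 1) l) hlo0
        (fun i hi2 => sieveWindow_flag (max (hi - 4096 + 1) l) hi i hlo0 (by omega))
    have hdd : max (hi - 4096 + 1) l + (hi - max (hi - 4096 + 1) l) = hi := by ring
    rw [hdd] at hfw
    rw [findDown_split l (max (hi - 4096 + 1) l) hi (by omega) (by omega)]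
    cases hft : lastTrueFrom (sieveWindow (max (hi - 4096 + 1) l) hi)
        (hi - max (hi - 4096 + 1) l) with
    | some i =>
        have hx : findDown (max (hi - 4096 + 1) l) hi = some (max (hi - 4096 + 1) l + i) := by
          rw [hft] at hfw
          simpa using hfw.symm
        rw [hx]
    | none =>
        have hx : findDown (max (hi - 4096 + 1) l) hi = none := by
          rw [hft] at hfw
          simpa using hfw.symm
        rw [hx]
        exact scanDown_eq_findDown l (max (hi - 4096 + 1) l - 1) h0
  · rw [if_neg h, findDown, if_neg h]
  termination_by (hi + 1 - l).toNat
  decreasing_by omega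

theorem findUp_some_ge (a b x : Int) (h : findUp a b = some x) : a ≤ x := by
  rw [findUp] at h
  by_cases hab : a ≤ b
  · rw [if_pos hab] at h
    cases hp : isPrime a with
    | true =>
        rw [hp] at h
        simp at h
        omega
    | false =>
        rw [hp] at h
        simp only [Bool.false_eq_true, if_false] at h
        have := findUp_some_ge (a + 1) b x h
        omega
  · rw [if_neg hab] at h
    cases h
  termination_by (b + 1 - a).toNat
  decreasing_by omega

-- ===== VERDICT (by name: the statement is the Claim_ definition above) =====
theorem check_spec : Claim_equal_check := by
  intro l r _ hpre
  unfold Spec_check check check_alt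
  rcases hpre with hlt | h0
  · rw [checkLoop, scanUp]
    simp [not_le.mpr hlt]
  · rw [checkLoop_phase1, scanUp_eq_findUp l r h0]
    cases hup : findUp l r with
    | none => rfl
    | some lp =>
        have hlp : 0 ≤ lp := le_trans h0 (findUp_some_ge l r lp hup)
        dsimp only
        rw [checkLoop_phase2, scanDown_eq_findDown lp r hlp]
        cases findDown lp r <;> rfl
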